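-- pv_equiv track=rewrite | github.com/cbrew/scotus_eyecite | scotus_eyecite/interleave.py | paras2
-- ===== SOURCE A (Python) =====
-- def paras2(text):
--     lines = text.splitlines(keepends=True)
--     if len(lines) == 0:
--         return
--     chunk = [lines[0]]
--     for line in lines[1:]:
--         if chunk[-1].isspace() and line.isspace():
--             chunk.append(line)
--         elif not chunk[-1].isspace() and not line.isspace():
--             chunk.append(line)
--         elif chunk[-1].isspace() and not line.isspace():
--             yield "".join(chunk),"space"
--             chunk = [line]
--         elif not chunk[-1].isspace() and line.isspace():
--             yield "".join(chunk),"nonspace"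
--             chunk = [line]
--     if chunk:
--         yield "".join(chunk),"space" if chunk[-1].isspace() else "nonspace"
-- ===== SOURCE B (Python) =====
-- def paras2(text):
--     lines = text.splitlines(keepends=True)
--     i = 0
--     n = len(lines)
--     while i < n:
--         key = lines[i].isspace()
--         j = i + 1
--         while j < n and lines[j].isspace() == key:
--             j += 1
--         yield "".join(lines[i:j]), "space" if key else "nonspace"
--         i = j
-- ===== Notes on version B (the rewrite author's own statement) =====
-- stated objective: simpler
-- what changed: Replaces A's stateful chunk accumulator with its four-way look-back if/elif chain and trailing flush by a single grouping pass: for each run start, scan forward to the end of the run of lines with the same isspace() key and yield the joined run directly.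
import Mathlib
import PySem

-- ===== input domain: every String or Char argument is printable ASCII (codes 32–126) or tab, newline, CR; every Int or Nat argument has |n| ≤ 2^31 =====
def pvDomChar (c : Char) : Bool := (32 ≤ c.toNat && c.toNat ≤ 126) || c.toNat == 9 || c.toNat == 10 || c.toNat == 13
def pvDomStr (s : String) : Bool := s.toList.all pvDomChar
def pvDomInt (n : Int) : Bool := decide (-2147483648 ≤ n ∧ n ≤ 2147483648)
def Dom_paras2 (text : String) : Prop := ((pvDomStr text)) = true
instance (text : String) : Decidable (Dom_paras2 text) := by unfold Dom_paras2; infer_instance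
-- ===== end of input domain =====

-- B replaces A's stateful chunk accumulator and four-way look-back comparison with one
-- grouping pass (scan forward to the end of each same-key run, then emit it); objective: simpler.
-- Both Pythons call text.splitlines(keepends=True); PySem has no keepends splitlines, so it is
-- ported by hand below (exact on the Dom alphabet, where the only line breaks are '\n', '\r', '\r\n').

def pvSplitKE : List Char → List (List Char)
  | [] => []
  | '\r' :: '\n' :: rest => ['\r', '\n'] :: pvSplitKE rest
  | c :: rest =>
    if c == '\n' || c == '\r' then [c] :: pvSplitKE rest
    else
      match pvSplitKE rest with
      | [] => [[c]]
      | l :: ls => (c :: l) :: ls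

-- ===== PORT A =====
-- A's loop: chunk is the current run of lines; chunk[-1] is chunk.getLast? (chunk is never
-- empty, so the .getD [] default is never taken); the final `if chunk:` flush is the [] case.
def paras2Loop (chunk : List (List Char)) : List (List Char) → List (List Char × String)
  | [] =>
    [(PySem.Chars.join [] chunk,
      if PySem.Chars.strIsspace ((chunk.getLast?).getD []) then "space" else "nonspace")]
  | line :: rest =>
    let lastL := (chunk.getLast?).getD []
    if PySem.Chars.strIsspace lastL && PySem.Chars.strIsspace line then
      paras2Loop (chunk ++ [line]) rest
    else if !PySem.Chars.strIsspace lastL && !PySem.Chars.strIsspace line then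
      paras2Loop (chunk ++ [line]) rest
    else if PySem.Chars.strIsspace lastL && !PySem.Chars.strIsspace line then
      (PySem.Chars.join [] chunk, "space") :: paras2Loop [line] rest
    else
      (PySem.Chars.join [] chunk, "nonspace") :: paras2Loop [line] rest

def paras2 (text : String) : List (String × String) :=
  match pvSplitKE text.toList with
  | [] => []
  | l0 :: rest => (paras2Loop [l0] rest).map (fun p => (String.ofList p.1, p.2))

-- ===== PORT B =====
-- B's outer while loop emits one group per iteration; the inner `while j < n and
-- lines[j].isspace() == key` scan is lines.span, i.e. takeWhile/dropWhile.
def paras2Grp : List (List Char) → List (List Char × String)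
  | [] => []
  | l :: rest =>
    let k := PySem.Chars.strIsspace l
    let g := rest.takeWhile (fun x => PySem.Chars.strIsspace x == k)
    (PySem.Chars.join [] (l :: g), if k then "space" else "nonspace")
      :: paras2Grp (rest.dropWhile (fun x => PySem.Chars.strIsspace x == k))
termination_by lines => lines.length
decreasing_by
  simpa using Nat.lt_succ_of_le (List.length_dropWhile_le _ _)

def paras2_alt (text : String) : List (String × String) :=
  (paras2Grp (pvSplitKE text.toList)).map (fun p => (String.ofList p.1, p.2))

-- ===== PRECONDITION & SPEC =====
def Spec_paras2 (text : String) (out : List (String × String)) : Prop := out = paras2_alt text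
instance (text : String) (out : List (String × String)) : Decidable (Spec_paras2 text out) := by unfold Spec_paras2; infer_instance

-- ===== CLAIM (what is proved, stated in full; the proofs are below) =====
def Claim_equal_paras2 : Prop := ∀ (text : String), Dom_paras2 text → Spec_paras2 text (paras2 text)

-- ===== LEMMAS AND PROOFS =====

theorem paras2Loop_eq_grp (rest : List (List Char)) :
    ∀ (chunk : List (List Char)) (lst : List Char), chunk.getLast? = some lst →
      paras2Loop chunk rest =
        (PySem.Chars.join []
            (chunk ++ rest.takeWhile (fun x => PySem.Chars.strIsspace x == PySem.Chars.strIsspace lst)),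
          if PySem.Chars.strIsspace lst then "space" else "nonspace")
          :: paras2Grp (rest.dropWhile (fun x => PySem.Chars.strIsspace x == PySem.Chars.strIsspace lst)) := by
  induction rest with
  | nil =>
    intro chunk lst h
    simp [paras2Loop, paras2Grp, h]
  | cons r rs ih =>
    intro chunk lst h
    by_cases hr : PySem.Chars.strIsspace r = PySem.Chars.strIsspace lst
    · -- same key: A appends to chunk, B keeps r in the current group
      have step : paras2Loop chunk (r :: rs) = paras2Loop (chunk ++ [r]) rs := by
        cases hk : PySem.Chars.strIsspace lst <;>
          simp [paras2Loop, h, hk, hk ▸ hr]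
      rw [step, ih (chunk ++ [r]) r (by simp)]
      simp [hr]
    · -- key flips: A flushes the chunk and restarts, B starts a new group
      have step : paras2Loop chunk (r :: rs) =
          (PySem.Chars.join [] chunk,
            if PySem.Chars.strIsspace lst then "space" else "nonspace") :: paras2Loop [r] rs := by
        cases hk : PySem.Chars.strIsspace lst <;>
          cases hk' : PySem.Chars.strIsspace r <;>
            simp_all [paras2Loop]
      rw [step, ih [r] r (by simp)]
      have hr' : (PySem.Chars.strIsspace r == PySem.Chars.strIsspace lst) = false := by
        simp [hr]
      simp [paras2Grp, hr']

-- ===== VERDICT (by name: the statement is the Claim_ definition above) =====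
theorem paras2_spec : Claim_equal_paras2 := by
  intro text _
  unfold Spec_paras2 paras2 paras2_alt
  cases hsp : pvSplitKE text.toList with
  | nil => simp [paras2Grp]
  | cons l0 rest =>
    simp only []
    rw [paras2Loop_eq_grp rest [l0] l0 (by simp)]
    simp [paras2Grp]
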